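-- pv_equiv track=rewrite | github.com/MdAbedin/binarysearch | 0536 Non-Consecutive String.py | solve
-- ===== SOURCE A (Python) =====
-- def solve(n, k):
--     if n == 0: return ""
--     p = 3 * (2**(n-1))
--     if k not in range(0, p): return ""
--
--     ans = []
--
--     if k < p//3:
--         ans.append("0")
--     elif k < 2*p//3:
--         ans.append("1")
--         k -= p//3
--     else:
--         ans.append("2")
--         k -= 2*p//3
--
--     p //= 3
--
--     for _ in range(n-1):
--         if k < p//2:
--             ans.append(min(x for x in "012" if x != ans[-1]))
--         else:
--             ans.append(max(x for x in "012" if x != ans[-1]))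
--             k -= p//2
--
--         p //= 2
--
--     return "".join(ans)
-- ===== SOURCE B (Python) =====
-- def solve(n, k):
--     if n == 0:
--         return ""
--     half = 1 << (n - 1)
--     if not (0 <= k < 3 * half):
--         return ""
--     first, r = divmod(k, half)
--     bits = [(r >> j) & 1 for j in range(n - 2, -1, -1)]
--     # Emit whole maximal runs of equal bits at once: within a run of bit v the
--     # characters alternate between str(2*v) and '1', starting with '1' exactly
--     # when the character just before the run already is str(2*v).
--     pieces = [str(first)]
--     i = 0
--     while i < len(bits):
--         j = i
--         while j < len(bits) and bits[j] == bits[i]: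
--             j += 1
--         L = j - i
--         two = str(2 * bits[i])
--         start = 1 if pieces[-1][-1] == two else 0
--         pieces.append(((two + "1") * L)[start:start + L])
--         i = j
--     return "".join(pieces)
-- ===== Notes on version B (the rewrite author's own statement) =====
-- stated objective: faster
-- what changed: B replaces A's per-position loop (which keeps a live subtree size p, compares k to p//2, subtracts, and picks min/max over the filtered string '012' at every step) by a run-length construction: it splits the binary expansion of r = k % 2**(n-1) into maximal runs of equal bits and emits each whole run as one alternating sliced block ((str(2*v)+'1')*L)[start:start+L], so no per-character comparison/subtraction against a shrinking big integer and no generator expressions are executed.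
import Mathlib
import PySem

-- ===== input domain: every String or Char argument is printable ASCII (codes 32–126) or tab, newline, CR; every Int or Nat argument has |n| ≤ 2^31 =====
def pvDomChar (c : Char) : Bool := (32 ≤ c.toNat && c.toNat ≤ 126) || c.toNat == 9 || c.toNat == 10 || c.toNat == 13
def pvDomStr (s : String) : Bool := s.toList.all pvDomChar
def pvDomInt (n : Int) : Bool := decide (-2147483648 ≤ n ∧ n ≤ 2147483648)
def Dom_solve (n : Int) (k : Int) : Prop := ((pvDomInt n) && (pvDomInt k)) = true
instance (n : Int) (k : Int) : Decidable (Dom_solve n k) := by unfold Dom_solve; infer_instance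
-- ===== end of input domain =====

-- B replaces A's per-position min/max loop by a run-length construction: the bits of
-- k % 2**(n-1) are grouped into maximal runs and each run is emitted as one alternating
-- sliced block; objective: faster (measured).


-- ===== PORT A =====
-- min(x for x in "012" if x != c) / max(...): the filtered list is never empty, so the
-- default ' ' of getD is never reached (Python's min/max would raise only on an empty iterable)
def pyMinNe (c : Char) : Char := (PySem.List.min? ("012".toList.filter (fun x => x ≠ c)) (fun x => x)).getD ' '
def pyMaxNe (c : Char) : Char := (PySem.List.max? ("012".toList.filter (fun x => x ≠ c)) (fun x => x)).getD ' '

-- 'for _ in range(n-1)' with state (k, p, ans); ans[-1] is pyGetD ans (-1) ' '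
def solveLoopA : Nat → Int → Int → List Char → List Char
  | 0, _, _, ans => ans
  | m+1, k, p, ans =>
    if k < PySem.Int.floordiv p 2 then
      solveLoopA m k (PySem.Int.floordiv p 2) (ans ++ [pyMinNe (PySem.List.pyGetD ans (-1) ' ')])
    else
      solveLoopA m (k - PySem.Int.floordiv p 2) (PySem.Int.floordiv p 2) (ans ++ [pyMaxNe (PySem.List.pyGetD ans (-1) ' ')])

def solve (n : Int) (k : Int) : String :=
  if n = 0 then "" else
  -- p = 3 * 2**(n-1); exact for n ≥ 1 (Pre_solve); Python raises TypeError for n < 0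
  let p : Int := 3 * 2 ^ (n - 1).toNat
  if ¬ (0 ≤ k ∧ k < p) then ""            -- k not in range(0, p)
  else if k < PySem.Int.floordiv p 3 then
    String.ofList (solveLoopA (n - 1).toNat k (PySem.Int.floordiv p 3) ['0'])
  else if k < PySem.Int.floordiv (2 * p) 3 then
    String.ofList (solveLoopA (n - 1).toNat (k - PySem.Int.floordiv p 3) (PySem.Int.floordiv p 3) ['1'])
  else
    String.ofList (solveLoopA (n - 1).toNat (k - PySem.Int.floordiv (2 * p) 3) (PySem.Int.floordiv p 3) ['2'])

-- ===== PORT B =====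
-- the outer/inner 'while' pair of Source B: the inner while scanning the current run of equal
-- bits is takeWhile/dropWhile; str(2*bits[i]) for a bit ∈ {0,1} is the single char '0'/'2'
def runLoopB : List Int → List (List Char) → List (List Char)
  | [], pieces => pieces
  | b :: bs, pieces =>
    let run := List.takeWhile (fun x => x == b) (b :: bs)
    let rest := List.dropWhile (fun x => x == b) (b :: bs)
    let two : Char := if b = 0 then '0' else '2'
    let lastc := PySem.List.pyGetD (PySem.List.pyGetD pieces (-1) []) (-1) ' '
    let start : Int := if lastc = two then 1 else 0
    runLoopB rest (pieces ++ [PySem.List.slice ((List.replicate run.length [two, '1']).flatten) (some start) (some (start + (run.length : Int)))])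
  termination_by bits _ => bits.length
  decreasing_by
    simp only [List.dropWhile_cons, beq_self_eq_true, if_pos]
    have := List.length_dropWhile_le (fun x => x == b) bs
    simp only [List.length_cons]
    omega

def solve_alt (n : Int) (k : Int) : String :=
  if n = 0 then "" else
  -- half = 1 << (n-1); exact for n ≥ 1 (Pre_solve); Python raises ValueError for n < 0
  let half : Int := 1 <<< (n - 1).toNat
  if ¬ (0 ≤ k ∧ k < 3 * half) then "" else
  let first := PySem.Int.floordiv k half
  let r := PySem.Int.mod k half
  let bits := (PySem.List.pyRange (n - 2) (-1) (-1)).map (fun j => PySem.Int.band (r >>> j.toNat) 1)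
  let pieces := runLoopB bits [(PySem.Int.toStr first).toList]
  PySem.Str.join "" (pieces.map String.ofList)

-- ===== PRECONDITION & SPEC =====
-- Pre_ excludes n < 0, where Python A raises TypeError (2**(n-1) is a float, rejected by range).
def Pre_solve (n : Int) (k : Int) : Prop := 0 ≤ n
instance (n : Int) (k : Int) : Decidable (Pre_solve n k) := by unfold Pre_solve; infer_instance
def pvWitness_solve : Int × Int := (3, 7)

def Spec_solve (n : Int) (k : Int) (out : String) : Prop := out = solve_alt n k
instance (n : Int) (k : Int) (out : String) : Decidable (Spec_solve n k out) := by unfold Spec_solve; infer_instance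

-- ===== CLAIM (what is proved, stated in full; the proofs are below) =====
def Claim_equal_solve : Prop := ∀ (n : Int) (k : Int), Dom_solve n k → Pre_solve n k → Spec_solve n k (solve n k)

-- ===== LEMMAS AND PROOFS =====

-- digit ↔ char correspondence used only by the proofs
def chrOf (d : Int) : Char := if d = 0 then '0' else if d = 1 then '1' else '2'

-- sequential specification: next digit from current bit and previous digit
def seqB : List Int → Int → List Int
  | [], _ => []
  | b :: bs, prev =>
    let nxt : Int := if b = 0 then (if prev = 0 then 1 else 0) else (if prev = 2 then 1 else 2)
    nxt :: seqB bs nxt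

-- bits of a, most significant first, positions m-1 … 0
def natBits (m a : Nat) : List Int := (List.range m).reverse.map (fun j => ((a / 2 ^ j % 2 : Nat) : Int))

-- alternating character list; s = true means the next char is '1'
def altC (t : Char) : Bool → Nat → List Char
  | _, 0 => []
  | s, L + 1 => (if s then '1' else t) :: altC t (!s) L

theorem natBits_succ (m a : Nat) :
    natBits (m + 1) a = ((a / 2 ^ m % 2 : Nat) : Int) :: natBits m a := by
  simp [natBits, List.range_succ]

theorem natBits_mem (m a : Nat) (b : Int) (hb : b ∈ natBits m a) : b = 0 ∨ b = 1 := by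
  simp only [natBits, List.mem_map] at hb
  obtain ⟨j, _, rfl⟩ := hb
  rcases Nat.mod_two_eq_zero_or_one (a / 2 ^ j) with h | h <;> simp [h]

theorem seqB_mem (bs : List Int) (prev d : Int) (hd : d ∈ seqB bs prev) :
    d = 0 ∨ d = 1 ∨ d = 2 := by
  induction bs generalizing prev with
  | nil => simp [seqB] at hd
  | cons b bs ih =>
    simp only [seqB, List.mem_cons] at hd
    rcases hd with h | h
    · rw [h]; split_ifs <;> simp
    · exact ih _ h

theorem seqB_append (xs ys : List Int) (prev : Int) :
    seqB (xs ++ ys) prev = seqB xs prev ++ seqB ys ((seqB xs prev).getLastD prev) := by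
  induction xs generalizing prev with
  | nil => simp [seqB]
  | cons x xs ih =>
    simp only [List.cons_append, seqB, ih]
    congr 2
    cases seqB xs _ <;> simp [List.getLast?_cons, List.getLastD_eq_getLast?]

-- A's loop computes the sequential specification on the bits of the remainder
theorem loopAB (m a : Nat) (prev : Int) (ans : List Char)
    (hp : prev = 0 ∨ prev = 1 ∨ prev = 2)
    (hl : PySem.List.pyGetD ans (-1) ' ' = chrOf prev) :
    solveLoopA m ((a % 2^m : Nat) : Int) ((2^m : Nat) : Int) ans
      = ans ++ (seqB (natBits m a) prev).map chrOf := by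
  induction m generalizing a prev ans with
  | zero => simp [solveLoopA, natBits, seqB]
  | succ m ih =>
    rw [natBits_succ]
    have hdiv : PySem.Int.floordiv ((2^(m+1):Nat):Int) 2 = ((2^m:Nat):Int) := by
      rw [show (2:Int) = ((2:Nat):Int) from rfl, PySem.Int.floordiv_natCast]
      norm_num [Nat.pow_succ]
    have hpos : 0 < 2^m := Nat.two_pow_pos m
    have hKdiv : a % 2^(m+1) / 2^m = a / 2^m % 2 := by
      rw [Nat.pow_succ]; exact Nat.mod_mul_right_div_self a (2^m) 2
    have hKmod : a % 2^(m+1) % 2^m = a % 2^m :=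
      Nat.mod_mod_of_dvd a (pow_dvd_pow 2 (Nat.le_succ m))
    have hdm : 2^m * (a % 2^(m+1) / 2^m) + a % 2^(m+1) % 2^m = a % 2^(m+1) :=
      Nat.div_add_mod _ _
    simp only [solveLoopA, hdiv]
    rcases Nat.mod_two_eq_zero_or_one (a / 2^m) with hb | hb
    · -- bit = 0: A takes the min branch
      have h0 : a % 2^(m+1) / 2^m = 0 := by rw [hKdiv, hb]
      rw [h0, Nat.mul_zero, Nat.zero_add] at hdm
      have hKa : a % 2^(m+1) = a % 2^m := by omega
      have hlt : a % 2^(m+1) < 2^m := by omega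
      rw [if_pos (by exact_mod_cast hlt), hl]
      have hmin : pyMinNe (chrOf prev) = chrOf (if prev = 0 then 1 else 0) := by
        rcases hp with h | h | h <;> subst h <;> decide
      rw [hmin, hKa]
      simp only [seqB, hb, Nat.cast_zero, if_pos rfl]
      rw [ih a (if prev = 0 then 1 else 0)
        (ans ++ [chrOf (if prev = 0 then 1 else 0)]) (by split_ifs <;> simp)
        (PySem.List.pyGetD_neg_one_append_singleton ans _ ' ')]
      simp
    · -- bit = 1: A takes the max branch
      have h0 : a % 2^(m+1) / 2^m = 1 := by rw [hKdiv, hb]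
      rw [h0, Nat.mul_one] at hdm
      have hge : 2^m ≤ a % 2^(m+1) := by omega
      have hKa : ((a % 2^(m+1) : Nat) : Int) - ((2^m : Nat) : Int) = ((a % 2^m : Nat) : Int) := by
        omega
      rw [if_neg (by exact_mod_cast not_lt.mpr hge), hl]
      have hmax : pyMaxNe (chrOf prev) = chrOf (if prev = 2 then 1 else 2) := by
        rcases hp with h | h | h <;> subst h <;> decide
      rw [hmax, hKa]
      simp only [seqB, hb, Nat.cast_one, if_neg one_ne_zero]
      rw [ih a (if prev = 2 then 1 else 2)
        (ans ++ [chrOf (if prev = 2 then 1 else 2)]) (by split_ifs <;> simp)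
        (PySem.List.pyGetD_neg_one_append_singleton ans _ ' ')]
      simp

-- B's bit extraction produces natBits
theorem bits_eq (M aa : Nat) :
    (PySem.List.pyRange ((M:Int) - 1) (-1) (-1)).map
        (fun j => PySem.Int.band ((((aa:Nat):Int)) >>> j.toNat) 1)
      = natBits M aa := by
  induction M with
  | zero =>
    rw [show ((0:Nat):Int) - 1 = (-1:Int) by norm_num,
      PySem.List.pyRange_neg_one_eq_nil (by norm_num)]
    simp [natBits]
  | succ m ih =>
    have h1 : (((m+1:Nat)):Int) - 1 = (m:Int) := by push_cast; ring
    rw [h1, PySem.List.pyRange_neg_one_cons (by omega), natBits_succ, List.map_cons, ← ih]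
    congr 1
    rw [Int.toNat_natCast, Int.shiftRight_natCast,
      show (1:Int) = ((1:Nat):Int) from rfl, PySem.Int.band_natCast,
      Nat.shiftRight_eq_div_pow, Nat.and_one_is_mod]

-- the repeated pattern (two + "1") * L is the alternating list
theorem flatten_replicate_pair (t : Char) (M : Nat) :
    (List.replicate M [t, '1']).flatten = altC t false (2 * M) := by
  induction M with
  | zero => simp [altC]
  | succ m ih =>
    rw [List.replicate_succ, List.flatten_cons, ih,
      show 2 * (m + 1) = (2 * m + 1) + 1 by ring]
    simp [altC]

theorem take_altC (t : Char) (s : Bool) (L m : Nat) :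
    (altC t s m).take L = altC t s (min L m) := by
  induction L generalizing s m with
  | zero => simp [altC]
  | succ l ih =>
    cases m with
    | zero => simp [altC]
    | succ m' => simp [altC, ih, Nat.succ_min_succ]

theorem getLastD_getLast (l : List Int) (h : l ≠ []) (d : Int) :
    l.getLastD d = l.getLast h := by
  rw [List.getLastD_eq_getLast?, List.getLast?_eq_getLast_of_ne_nil h]; rfl

theorem seqB_length (bs : List Int) (prev : Int) : (seqB bs prev).length = bs.length := by
  induction bs generalizing prev with
  | nil => simp [seqB]
  | cons b bs ih => simp [seqB, ih]

theorem drop_one_altC (t : Char) (s : Bool) (m : Nat) :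
    (altC t s (m + 1)).drop 1 = altC t (!s) m := by
  simp [altC]

-- the sequential digits of a constant run alternate
theorem seqB_replicate (b prev : Int) (L : Nat)
    (hb : b = 0 ∨ b = 1) (hp : prev = 0 ∨ prev = 1 ∨ prev = 2) :
    (seqB (List.replicate L b) prev).map chrOf
      = altC (if b = 0 then '0' else '2') (chrOf prev = (if b = 0 then '0' else '2')) L := by
  induction L generalizing prev with
  | zero => simp [seqB, altC]
  | succ l ih =>
    set t : Char := if b = 0 then '0' else '2' with ht
    have step : (if b = 0 then (if prev = 0 then 1 else 0) else (if prev = 2 then 1 else 2))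
        = (if chrOf prev = t then (1:Int) else (if b = 0 then 0 else 2)) := by
      rcases hb with rfl | rfl <;> rcases hp with rfl | rfl | rfl <;> simp [chrOf, ht]
    rw [List.replicate_succ]
    simp only [seqB, step, List.map_cons]
    by_cases hc : chrOf prev = t
    · have hne : ('1':Char) ≠ t := by rcases hb with rfl | rfl <;> simp [ht]
      rw [if_pos hc, ih 1 (by norm_num)]
      simp [altC, hc, hne, show chrOf 1 = '1' from by decide]
    · have hv : (if b = 0 then (0:Int) else 2) = 0 ∨ (if b = 0 then (0:Int) else 2) = 2 := by
        split_ifs <;> simp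
      have hcv : chrOf (if b = 0 then (0:Int) else 2) = t := by
        rcases hb with rfl | rfl <;> simp [chrOf, ht]
      rw [if_neg hc, ih _ (by rcases hv with h | h <;> rw [h] <;> norm_num)]
      simp [altC, hc, hcv]

-- flattening B's run loop yields the sequential specification
theorem runB (N : Nat) (bits : List Int) (hN : bits.length ≤ N) (prev : Int)
    (pieces : List (List Char))
    (hb : ∀ b ∈ bits, b = 0 ∨ b = 1) (hp : prev = 0 ∨ prev = 1 ∨ prev = 2)
    (hl : PySem.List.pyGetD (PySem.List.pyGetD pieces (-1) []) (-1) ' ' = chrOf prev) :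
    (runLoopB bits pieces).flatten = pieces.flatten ++ (seqB bits prev).map chrOf := by
  induction N generalizing bits prev pieces with
  | zero =>
    have : bits = [] := List.eq_nil_of_length_eq_zero (Nat.le_zero.mp hN)
    subst this; simp [runLoopB, seqB]
  | succ N ih =>
    cases bits with
    | nil => simp [runLoopB, seqB]
    | cons b bs =>
      have hbb : b = 0 ∨ b = 1 := hb b (by simp)
      -- abbreviations matching the unfolding of runLoopB
      have hbeq : (fun x => x == b) b = true := by simp
      have hsplit : List.takeWhile (fun x => x == b) (b :: bs)
          ++ List.dropWhile (fun x => x == b) (b :: bs) = b :: bs :=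
        List.takeWhile_append_dropWhile
      set run := List.takeWhile (fun x => x == b) (b :: bs) with hrun
      set rest := List.dropWhile (fun x => x == b) (b :: bs) with hrest
      have hrep : run = List.replicate run.length b := by
        rw [List.eq_replicate_iff]
        exact ⟨rfl, fun x hx => by
          have := List.mem_takeWhile_imp hx
          simpa using this⟩
      have hL1 : 1 ≤ run.length := by
        rw [hrun, List.takeWhile_cons]
        simp
      have hrestlen : rest.length ≤ N := by
        rw [hrest, List.dropWhile_cons]
        simp only [beq_self_eq_true, if_pos]
        have := List.length_dropWhile_le (fun x => x == b) bs
        simp only [List.length_cons] at hN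
        omega
      set t : Char := if b = 0 then '0' else '2' with ht
      set L := run.length with hLdef
      set ds := seqB run prev with hds
      have hdsne : ds ≠ [] := by
        have : ds.length = L := by rw [hds, hLdef, seqB_length]
        intro hnil; rw [hnil] at this; simp at this; omega
      set prev' := ds.getLastD prev with hprev'
      have hp' : prev' = 0 ∨ prev' = 1 ∨ prev' = 2 := by
        rw [hprev', getLastD_getLast ds hdsne]
        exact seqB_mem run prev _ (List.getLast_mem hdsne)
      have hmapds : ds.map chrOf = altC t (decide (chrOf prev = t)) L := by
        rw [hds, hLdef]
        conv_lhs => rw [hrep]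
        rw [seqB_replicate b prev run.length hbb hp]
      -- the emitted piece equals the chars of the run's sequential digits
      have hpiece : PySem.List.slice ((List.replicate L [t, '1']).flatten)
          (some (if chrOf prev = t then (1:Int) else 0))
          (some ((if chrOf prev = t then (1:Int) else 0) + (L : Int))) = ds.map chrOf := by
        rw [hmapds, flatten_replicate_pair]
        by_cases hc : chrOf prev = t
        · rw [if_pos hc]
          rw [show ((1:Int)) = ((1:Nat):Int) from rfl,
            show ((1:Nat):Int) + (L:Int) = ((1 + L : Nat):Int) by push_cast; ring,
            PySem.List.slice_natCast]
          obtain ⟨M, hM⟩ : ∃ M, 2 * L = M + 1 := ⟨2 * L - 1, by omega⟩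
          rw [hM, drop_one_altC, take_altC, hc]
          simp only [decide_true]
          congr 1
          omega
        · rw [if_neg hc]
          rw [show ((0:Int)) = ((0:Nat):Int) from rfl,
            show ((0:Nat):Int) + (L:Int) = ((0 + L : Nat):Int) by push_cast; ring,
            PySem.List.slice_natCast, Nat.zero_add, List.drop_zero, Nat.sub_zero,
            take_altC]
          simp only [hc, decide_false]
          congr 1
          omega
      -- apply the induction hypothesis on the rest
      have hbrest : ∀ x ∈ rest, x = 0 ∨ x = 1 :=
        fun x hx => hb x ((List.dropWhile_sublist (fun y => y == b)).mem hx)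
      have hseqsplit : seqB (b :: bs) prev = ds ++ seqB rest prev' := by
        conv_lhs => rw [← hsplit]
        rw [seqB_append, ← hds, ← hprev']
      rw [runLoopB]
      show (runLoopB rest (pieces ++ [PySem.List.slice ((List.replicate run.length [t, '1']).flatten)
          (some (if PySem.List.pyGetD (PySem.List.pyGetD pieces (-1) []) (-1) ' ' = t then (1:Int) else 0))
          (some ((if PySem.List.pyGetD (PySem.List.pyGetD pieces (-1) []) (-1) ' ' = t then (1:Int) else 0) + (run.length : Int)))])).flatten
        = pieces.flatten ++ (seqB (b :: bs) prev).map chrOf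
      rw [hl, ← hLdef, hpiece]
      have hl' : PySem.List.pyGetD (PySem.List.pyGetD (pieces ++ [ds.map chrOf]) (-1) []) (-1) ' '
          = chrOf prev' := by
        rw [PySem.List.pyGetD_neg_one_append_singleton]
        have hne : ds.map chrOf ≠ [] := by simpa using hdsne
        rw [PySem.List.pyGetD_neg_one (h := hne), hprev',
          getLastD_getLast ds hdsne]
        exact List.getLast_map hne
      rw [ih rest hrestlen prev' (pieces ++ [ds.map chrOf]) hbrest hp' hl']
      rw [hseqsplit]
      simp

theorem join_nil_flatten (xs : List (List Char)) : PySem.Chars.join [] xs = xs.flatten := by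
  show ([] : List Char).intercalate xs = xs.flatten
  unfold List.intercalate
  induction xs with
  | nil => simp
  | cons x xs ih =>
    cases xs with
    | nil => simp
    | cons y ys => simpa [List.intersperse] using ih

-- join of char-list pieces is the flatten
theorem join_pieces (l : List (List Char)) :
    PySem.Str.join "" (l.map String.ofList) = String.ofList l.flatten := by
  apply String.toList_inj.mp
  simp only [PySem.Str.join, String.toList_empty, String.toList_ofList, List.map_map]
  have hid : List.map (String.toList ∘ String.ofList) l = l := by
    simp [Function.comp_def]
  rw [hid, join_nil_flatten]

-- ===== VERDICT (by name: the statement is the Claim_ definition above) =====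
theorem solve_spec : Claim_equal_solve := by
  unfold Claim_equal_solve
  intro n k _ hpre
  unfold Spec_solve
  by_cases hn : n = 0
  · subst hn; rfl
  have hn1 : 1 ≤ n := by unfold Pre_solve at hpre; omega
  obtain ⟨M, hM⟩ : ∃ M : Nat, n - 1 = (M:Int) := ⟨(n-1).toNat, by omega⟩
  have hMt : (n - 1).toNat = M := by rw [hM]; exact Int.toNat_natCast M
  have hr2 : n - 2 = (M:Int) - 1 := by omega
  have hc2 : ((2:Int)^M) = ((2^M:Nat):Int) := by push_cast; ring
  have hsh : ((1:Int) <<< M) = ((2^M:Nat):Int) := by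
    rw [Int.shiftLeft_eq]; push_cast; ring
  have hsh2 : ((1 <<< M : Nat):Int) = ((2^M:Nat):Int) := by
    norm_num [Nat.shiftLeft_eq]
  simp only [solve, solve_alt, if_neg hn, hMt, hr2, hc2, hsh, hsh2]
  by_cases hk : 0 ≤ k ∧ k < 3 * ((2^M:Nat):Int)
  case neg => rw [if_pos hk, if_pos hk]
  have hg : ¬¬(0 ≤ k ∧ k < 3 * ((2^M:Nat):Int)) := not_not_intro hk
  rw [if_neg hg, if_neg hg]
  obtain ⟨a, rfl⟩ := Int.eq_ofNat_of_zero_le hk.1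
  have ha : a < 3 * 2^M := by exact_mod_cast hk.2
  have hpos : 0 < 2^M := Nat.two_pow_pos M
  have hf1 : PySem.Int.floordiv ((3:Int) * ((2^M:Nat):Int)) 3 = ((2^M:Nat):Int) := by
    rw [show (3:Int) * ((2^M:Nat):Int) = ((3 * 2^M : Nat):Int) by push_cast; ring,
      show (3:Int) = ((3:Nat):Int) from rfl, PySem.Int.floordiv_natCast]
    norm_num
  have hf2 : PySem.Int.floordiv (2 * ((3:Int) * ((2^M:Nat):Int))) 3 = ((2*2^M:Nat):Int) := by
    rw [show (2 * ((3:Int) * ((2^M:Nat):Int))) = ((3 * (2 * 2^M) : Nat):Int) by push_cast; ring,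
      show (3:Int) = ((3:Nat):Int) from rfl, PySem.Int.floordiv_natCast]
    norm_num
  have hprev : PySem.Int.floordiv ((a:Nat):Int) ((2^M:Nat):Int) = ((a / 2^M : Nat):Int) :=
    PySem.Int.floordiv_natCast a (2^M)
  have hmod : PySem.Int.mod ((a:Nat):Int) ((2^M:Nat):Int) = ((a % 2^M : Nat):Int) :=
    PySem.Int.mod_natCast a (2^M)
  have hdm := Nat.div_add_mod a (2^M)
  have hbits := bits_eq M (a % 2^M)
  have hBall : ∀ b ∈ natBits M (a % 2^M), b = 0 ∨ b = 1 := fun b hb => natBits_mem _ _ b hb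
  rw [hprev, hmod, hbits]
  by_cases h0 : a < 2^M
  · -- first digit 0
    have hd0 : a / 2^M = 0 := Nat.div_eq_of_lt h0
    have hae : a % 2^M = a := Nat.mod_eq_of_lt h0
    rw [hf1, if_pos (by exact_mod_cast h0), hd0, Nat.cast_zero]
    have hA := loopAB M (a % 2^M) 0 ['0'] (by norm_num) (by decide)
    rw [Nat.mod_mod_of_dvd a (dvd_refl _)] at hA
    rw [show ((a:Nat):Int) = ((a % 2^M : Nat):Int) by rw [hae], hA]
    have hB := runB (natBits M (a % 2^M)).length (natBits M (a % 2^M)) le_rfl 0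
      [(PySem.Int.toStr 0).toList] hBall (by norm_num) (by decide)
    rw [join_pieces, hB]
    simp [show (PySem.Int.toStr (0:Int)).toList = ['0'] from by decide, chrOf]
  by_cases h1 : a < 2 * 2^M
  · -- first digit 1
    have hd1 : a / 2^M = 1 := Nat.div_eq_of_lt_le (by omega) (by omega)
    rw [hd1] at hdm
    have hk1 : ((a:Nat):Int) - ((2^M:Nat):Int) = ((a % 2^M : Nat):Int) := by omega
    rw [hf1, hf2, if_neg (by exact_mod_cast h0), if_pos (by exact_mod_cast h1), hk1,
      hd1, Nat.cast_one]
    have hA := loopAB M (a % 2^M) 1 ['1'] (by norm_num) (by decide)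
    rw [Nat.mod_mod_of_dvd a (dvd_refl _)] at hA
    rw [hA]
    have hB := runB (natBits M (a % 2^M)).length (natBits M (a % 2^M)) le_rfl 1
      [(PySem.Int.toStr 1).toList] hBall (by norm_num) (by decide)
    rw [join_pieces, hB]
    simp [show (PySem.Int.toStr (1:Int)).toList = ['1'] from by decide, chrOf]
  · -- first digit 2
    have hd2 : a / 2^M = 2 := Nat.div_eq_of_lt_le (by omega) (by omega)
    rw [hd2] at hdm
    have hk2 : ((a:Nat):Int) - ((2*2^M:Nat):Int) = ((a % 2^M : Nat):Int) := by omega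
    rw [hf1, hf2, if_neg (by exact_mod_cast h0), if_neg (by exact_mod_cast h1), hk2,
      hd2, Nat.cast_two]
    have hA := loopAB M (a % 2^M) 2 ['2'] (by norm_num) (by decide)
    rw [Nat.mod_mod_of_dvd a (dvd_refl _)] at hA
    rw [hA]
    have hB := runB (natBits M (a % 2^M)).length (natBits M (a % 2^M)) le_rfl 2
      [(PySem.Int.toStr 2).toList] hBall (by norm_num) (by decide)
    rw [join_pieces, hB]
    simp [show (PySem.Int.toStr (2:Int)).toList = ['2'] from by decide, chrOf]
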